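-- pv_equiv track=rewrite | github.com/florensacc/rllab-curriculum | sandbox/rocky/hrl/core/layers.py | get_output_shape_for
-- ===== SOURCE A (Python) =====
-- def get_output_shape_for(input_shapes):
--     gate_shape, current_shape, prev_shape = input_shapes
--     # Infer the output shape by grabbing, for each axis, the first
--     # input size that is not `None` (if there is any)
--     output_shape = tuple(next((s for s in sizes if s is not None), None)
--                          for sizes in zip(current_shape, prev_shape))
--
--     def match(shape1, shape2):
--         return (len(shape1) == len(shape2) and
--                 all(s1 is None or s2 is None or s1 == s2
--                     for s1, s2 in zip(shape1, shape2)))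
--
--     # Check for compatibility with inferred output shape
--     if not all(match(shape, output_shape) for shape in (current_shape, prev_shape)):
--         raise ValueError("Mismatch: l_current shape should be compatible with l_prev shape")
--     return output_shape
-- ===== SOURCE B (Python) =====
-- def get_output_shape_for(input_shapes):
--     gate_shape, current_shape, prev_shape = input_shapes
--     if len(current_shape) != len(prev_shape):
--         raise ValueError("Mismatch: l_current shape should be compatible with l_prev shape")
--     output = []
--     for c, p in zip(current_shape, prev_shape):
--         if c is not None and p is not None and c != p:
--             raise ValueError("Mismatch: l_current shape should be compatible with l_prev shape")
--         output.append(c if c is not None else p)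
--     return tuple(output)
-- ===== Notes on version B (the rewrite author's own statement) =====
-- stated objective: simpler
-- what changed: Replaces A's build-a-tuple-then-two-match-passes (inference comprehension plus a separate match() validation against current and prev) by one explicit length guard followed by a single fused infer-and-validate loop over zip(current_shape, prev_shape).
import Mathlib
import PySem

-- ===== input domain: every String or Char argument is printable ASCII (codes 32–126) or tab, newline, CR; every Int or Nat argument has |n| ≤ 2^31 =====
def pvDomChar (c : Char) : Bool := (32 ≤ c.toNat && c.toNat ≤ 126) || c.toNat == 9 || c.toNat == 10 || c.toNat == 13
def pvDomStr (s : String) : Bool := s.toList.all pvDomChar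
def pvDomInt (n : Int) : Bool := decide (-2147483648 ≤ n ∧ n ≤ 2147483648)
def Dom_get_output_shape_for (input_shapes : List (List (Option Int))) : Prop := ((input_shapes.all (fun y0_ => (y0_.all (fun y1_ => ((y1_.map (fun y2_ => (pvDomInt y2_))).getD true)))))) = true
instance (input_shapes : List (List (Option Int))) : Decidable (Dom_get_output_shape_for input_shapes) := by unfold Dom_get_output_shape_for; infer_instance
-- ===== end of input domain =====

-- B fuses A's infer-comprehension and two match() validation passes into one length guard
-- plus a single infer-and-validate loop; objective: simpler, same behaviour (raises excluded by Pre_).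

-- ===== PORT A =====
-- next((s for s in sizes if s is not None), None) over sizes = (current[i], prev[i])
def pvFirstSome (c p : Option Int) : Option Int :=
  match c with
  | some v => some v
  | none => p

-- tuple(... for sizes in zip(current_shape, prev_shape))
def pvMergeShapes (c p : List (Option Int)) : List (Option Int) :=
  (c.zip p).map (fun sp => pvFirstSome sp.1 sp.2)

-- the inner helper `match(shape1, shape2)`
def pvMatchShapes (s1 s2 : List (Option Int)) : Bool :=
  s1.length == s2.length &&
    (s1.zip s2).all (fun sp => sp.1.isNone || sp.2.isNone || sp.1 == sp.2)

def get_output_shape_for (input_shapes : List (List (Option Int))) : List (Option Int) :=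
  match input_shapes with
  | [_, current_shape, prev_shape] =>
    let output_shape := pvMergeShapes current_shape prev_shape
    if pvMatchShapes current_shape output_shape && pvMatchShapes prev_shape output_shape then
      output_shape
    else
      []  -- raise ValueError (outside Pre_)
  | _ => []  -- unpacking raises (outside Pre_)

-- ===== PORT B =====
-- the fused infer-and-validate loop; `none` = raise ValueError
def pvAltGo : List (Option Int) → List (Option Int) → Option (List (Option Int))
  | [], _ => some []
  | _, [] => some []
  | c :: cs, p :: ps =>
    if c.isSome && p.isSome && c ≠ p then none
    else (pvAltGo cs ps).map (fun rest => (if c.isSome then c else p) :: rest)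

def get_output_shape_for_alt (input_shapes : List (List (Option Int))) : List (Option Int) :=
  if input_shapes.length ≠ 3 then []  -- unpacking raises (outside Pre_)
  else
    let current_shape := input_shapes.getD 1 []
    let prev_shape := input_shapes.getD 2 []
    if current_shape.length ≠ prev_shape.length then []  -- raise ValueError (outside Pre_)
    else (pvAltGo current_shape prev_shape).getD []  -- getD: raise path, outside Pre_

-- ===== PRECONDITION & SPEC =====
-- Pre_ excludes exactly the inputs where the Python A raises: input_shapes not of length 3
-- (unpacking raises), unequal current/prev lengths or an incompatible axis (ValueError);
-- B raises there too.
def Pre_get_output_shape_for (input_shapes : List (List (Option Int))) : Prop :=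
  input_shapes.length = 3 ∧
  (input_shapes.getD 1 []).length = (input_shapes.getD 2 []).length ∧
  ∀ sp ∈ (input_shapes.getD 1 []).zip (input_shapes.getD 2 []),
    sp.1.isSome → sp.2.isSome → sp.1 = sp.2
instance (input_shapes : List (List (Option Int))) : Decidable (Pre_get_output_shape_for input_shapes) := by
  unfold Pre_get_output_shape_for; infer_instance

def pvWitness_get_output_shape_for : List (List (Option Int)) :=
  [[some 2, some 3], [some 5, none, some 7], [some 5, some 4, none]]

def Spec_get_output_shape_for (input_shapes : List (List (Option Int))) (out : List (Option Int)) : Prop := out = get_output_shape_for_alt input_shapes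
instance (input_shapes : List (List (Option Int))) (out : List (Option Int)) : Decidable (Spec_get_output_shape_for input_shapes out) := by unfold Spec_get_output_shape_for; infer_instance

-- ===== CLAIM (what is proved, stated in full; the proofs are below) =====
def Claim_equal_get_output_shape_for : Prop := ∀ (input_shapes : List (List (Option Int))), Dom_get_output_shape_for input_shapes → Pre_get_output_shape_for input_shapes → Spec_get_output_shape_for input_shapes (get_output_shape_for input_shapes)

-- ===== LEMMAS AND PROOFS =====

-- on compatible, equal-length shapes the fused loop returns A's merged shape
theorem pvAltGo_eq_merge (c p : List (Option Int))
    (hcomp : ∀ sp ∈ c.zip p, sp.1.isSome → sp.2.isSome → sp.1 = sp.2) :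
    pvAltGo c p = some (pvMergeShapes c p) := by
  induction c generalizing p with
  | nil => cases p <;> simp [pvAltGo, pvMergeShapes]
  | cons a cs ih =>
    cases p with
    | nil => simp [pvAltGo, pvMergeShapes]
    | cons b ps =>
      have h0 := hcomp (a, b) (by simp)
      have hrest : ∀ sp ∈ cs.zip ps, sp.1.isSome → sp.2.isSome → sp.1 = sp.2 := by
        intro sp hsp; exact hcomp sp (by simp [hsp])
      cases a <;> cases b <;>
        simp_all [pvAltGo, ih ps hrest, pvMergeShapes, pvFirstSome]

theorem pvMatch_merge (c p : List (Option Int)) (hlen : c.length = p.length)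
    (hcomp : ∀ sp ∈ c.zip p, sp.1.isSome → sp.2.isSome → sp.1 = sp.2) :
    pvMatchShapes c (pvMergeShapes c p) = true ∧
    pvMatchShapes p (pvMergeShapes c p) = true := by
  induction c generalizing p with
  | nil =>
    cases p with
    | nil => simp [pvMatchShapes, pvMergeShapes]
    | cons b ps => simp at hlen
  | cons a cs ih =>
    cases p with
    | nil => simp at hlen
    | cons b ps =>
      have h0 := hcomp (a, b) (by simp)
      have hrest : ∀ sp ∈ cs.zip ps, sp.1.isSome → sp.2.isSome → sp.1 = sp.2 := by
        intro sp hsp; exact hcomp sp (by simp [hsp])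
      have hlen' : cs.length = ps.length := by simpa using hlen
      obtain ⟨ih1, ih2⟩ := ih ps hlen' hrest
      simp only [pvMatchShapes, pvMergeShapes, List.zip_cons_cons, List.map_cons,
        List.all_cons, List.length_cons, Bool.and_eq_true, beq_iff_eq] at ih1 ih2 ⊢
      refine ⟨⟨by omega, ?_, ih1.2⟩, ⟨by omega, ?_, ih2.2⟩⟩ <;>
        · clear ih ih1 ih2 hrest hlen hlen' hcomp
          cases a <;> cases b <;> simp_all [pvFirstSome]

-- ===== VERDICT (by name: the statement is the Claim_ definition above) =====
theorem get_output_shape_for_spec : Claim_equal_get_output_shape_for := by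
  intro input_shapes _ hpre
  unfold Spec_get_output_shape_for
  match input_shapes with
  | [] | [_] | [_, _] | _ :: _ :: _ :: _ :: _ :: _ => exact absurd hpre.1 (by simp)
  | [g, c, p] =>
    obtain ⟨-, hlen, hcomp⟩ := hpre
    simp only [List.getD, List.getElem?_cons_succ, List.getElem?_cons_zero, Option.getD_some]
      at hlen hcomp
    obtain ⟨h1, h2⟩ := pvMatch_merge c p hlen hcomp
    simp [get_output_shape_for, get_output_shape_for_alt, hlen, h1, h2,
      pvAltGo_eq_merge c p hcomp]
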